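-- pv_equiv track=rewrite | github.com/sumansahoo16/leetcode | 2150.py | findLonely
-- ===== SOURCE A (Python) =====
-- from typing import List
--
-- def findLonely(nums: List[int]) -> List[int]:
--
--     count = {}
--     for n in nums:
--         if n in count : count[n] += 1
--         else : count[n] = 1
--
--     lonely = []
--     for key in count.keys():
--         if count[key] > 1 : continue
--         if (key - 1) in count : continue
--         if (key + 1) in count : continue
--
--         lonely.append(key)
--
--     return lonely
-- ===== SOURCE B (Python) =====
-- from typing import List
--
-- def findLonely(nums: List[int]) -> List[int]:
--     s = sorted(nums)
--     lonely = set()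
--     for i in range(len(s)):
--         if (i == 0 or s[i - 1] <= s[i] - 2) and (i == len(s) - 1 or s[i + 1] >= s[i] + 2):
--             lonely.add(s[i])
--     return [n for n in nums if n in lonely]
-- ===== Notes on version B (the rewrite author's own statement) =====
-- stated objective: alternative
-- what changed: Replaces A's hash-count-then-filter-keys with a sort-based scan: sort a copy, mark a value lonely iff both sorted neighbours differ from it by at least 2 (which implies uniqueness and no value +/-1), then filter the original list to keep first-appearance order.
import Mathlib
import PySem

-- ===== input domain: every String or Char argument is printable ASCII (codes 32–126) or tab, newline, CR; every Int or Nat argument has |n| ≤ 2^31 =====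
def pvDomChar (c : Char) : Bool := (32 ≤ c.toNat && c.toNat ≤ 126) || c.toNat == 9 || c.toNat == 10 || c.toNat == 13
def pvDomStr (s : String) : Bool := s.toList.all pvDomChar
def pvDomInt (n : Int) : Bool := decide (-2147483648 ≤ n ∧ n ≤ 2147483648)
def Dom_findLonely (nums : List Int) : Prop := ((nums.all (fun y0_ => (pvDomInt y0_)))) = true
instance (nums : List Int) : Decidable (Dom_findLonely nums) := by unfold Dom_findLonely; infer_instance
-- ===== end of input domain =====

-- B replaces A's hash-count-then-filter-keys with a sort-based scan: a value is lonely
-- iff both sorted neighbours (when present) differ from it by at least 2; the original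
-- list is then filtered so the first-appearance output order is preserved.

-- ===== PORT A =====
def findLonely (nums : List Int) : List Int :=
  let count := nums.foldl (fun d n =>
    if d.contains n then d.insert n (d.getD n 0 + 1) else d.insert n 1)
    (PySem.Dict.empty : PySem.Dict Int Int)
  -- count[key] in the loop: key comes from count.keys, so the lookup cannot raise; getD 0 is exact here
  count.keys.foldl (fun lonely key =>
    if count.getD key 0 > 1 then lonely
    else if count.contains (key - 1) then lonely
    else if count.contains (key + 1) then lonely
    else lonely ++ [key]) []

-- ===== PORT B =====
-- the loop body's test '(i == 0 or s[i-1] <= s[i]-2) and (i == len(s)-1 or s[i+1] >= s[i]+2)'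
def pvLonelyCond (s : List Int) (i : Int) : Bool :=
  (decide (i = 0) || decide (PySem.List.pyGetD s (i - 1) 0 ≤ PySem.List.pyGetD s i 0 - 2)) &&
  (decide (i = (s.length : Int) - 1) || decide (PySem.List.pyGetD s (i + 1) 0 ≥ PySem.List.pyGetD s i 0 + 2))

def findLonely_alt (nums : List Int) : List Int :=
  let s := PySem.List.sorted nums (fun x => x)
  let lonely : PySem.Set Int := (PySem.List.pyRange 0 (s.length : Int) 1).foldl
    (fun acc i => if pvLonelyCond s i then acc.add (PySem.List.pyGetD s i 0) else acc) []
  nums.filter (fun n => lonely.contains n)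

-- ===== PRECONDITION & SPEC =====
def Spec_findLonely (nums : List Int) (out : List Int) : Prop := out = findLonely_alt nums
instance (nums : List Int) (out : List Int) : Decidable (Spec_findLonely nums out) := by unfold Spec_findLonely; infer_instance

-- ===== CLAIM (what is proved, stated in full; the proofs are below) =====
def Claim_equal_findLonely : Prop := ∀ (nums : List Int), Dom_findLonely nums → Spec_findLonely nums (findLonely nums)

-- ===== LEMMAS AND PROOFS =====

-- filtering a Set.ofList fold by a predicate that only holds on count-≤-1 values
-- equals filtering the underlying list (such values appear at most once on either side)
theorem filter_foldl_add (p : Int → Bool) :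
    ∀ (xs s : List Int), (∀ n, p n = true → s.count n + xs.count n ≤ 1) →
      (xs.foldl PySem.Set.add s).filter p = s.filter p ++ xs.filter p := by
  intro xs
  induction xs with
  | nil => intro s _; simp
  | cons x t ih =>
    intro s h
    simp only [List.foldl_cons]
    by_cases hmem : x ∈ s
    · have hpx : p x = false := by
        by_contra hp
        have hp' : p x = true := by simpa using hp
        have := h x hp'
        have h1 : 1 ≤ s.count x := List.one_le_count_iff.mpr hmem
        simp [List.count_cons_self] at this
        omega
      have hadd : PySem.Set.add s x = s := by
        simp [PySem.Set.add, PySem.Set.contains, hmem]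
      rw [hadd, ih s ?_]
      · simp [hpx]
      · intro n hp
        have := h n hp
        simp [List.count_cons] at this ⊢
        omega
    · have hadd : PySem.Set.add s x = s ++ [x] := by
        simp [PySem.Set.add, PySem.Set.contains, hmem]
      rw [hadd, ih (s ++ [x]) ?_]
      · simp only [List.filter_append, List.filter_cons, List.append_assoc]
        congr 1
        by_cases hpx : p x = true <;> simp [hpx]
      · intro n hp
        have := h n hp
        by_cases hnx : n = x
        · subst hnx
          simp [List.count_append] at this ⊢
          omega
        · simp [List.count_append, List.count_cons] at this ⊢
          omega

-- membership in B's conditional set-building fold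
theorem mem_foldl_add_if (p : Int → Bool) (f : Int → Int) :
    ∀ (l : List Int) (s : PySem.Set Int) (m : Int),
      (m ∈ l.foldl (fun acc i => if p i then PySem.Set.add acc (f i) else acc) s) ↔
        m ∈ s ∨ ∃ i ∈ l, p i = true ∧ f i = m := by
  intro l
  induction l with
  | nil => intro s m; simp
  | cons x t ih =>
    intro s m
    simp only [List.foldl_cons]
    by_cases hp : p x = true
    · rw [if_pos hp, ih]
      simp only [PySem.Set.mem_add, List.mem_cons]
      constructor
      · rintro (⟨h | h⟩ | ⟨i, hi, hpi, hfi⟩)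
        · exact Or.inl h
        · exact Or.inr ⟨x, Or.inl rfl, hp, h.symm⟩
        · exact Or.inr ⟨i, Or.inr hi, hpi, hfi⟩
      · rintro (h | ⟨i, rfl | hi', hpi, hfi⟩)
        · exact Or.inl (Or.inl h)
        · exact Or.inl (Or.inr hfi.symm)
        · exact Or.inr ⟨i, hi', hpi, hfi⟩
    · rw [if_neg hp, ih]
      constructor
      · rintro (h | ⟨i, hi, hpi, hfi⟩)
        · exact Or.inl h
        · exact Or.inr ⟨i, List.mem_cons_of_mem x hi, hpi, hfi⟩
      · rintro (h | ⟨i, hi, hpi, hfi⟩)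
        · exact Or.inl h
        · rcases List.mem_cons.mp hi with rfl | hi'
          · exact absurd hpi hp
          · exact Or.inr ⟨i, hi', hpi, hfi⟩

-- two distinct positions carrying v force count v ≥ 2
theorem two_le_count_of_indices (s : List Int) (v : Int) (j k : Nat) (hjk : j < k)
    (hk : k < s.length) (h1 : s[j]'(by omega) = v) (h2 : s[k] = v) :
    2 ≤ s.count v := by
  have hsplit : s = s.take k ++ s.drop k := (List.take_append_drop k s).symm
  have h1' : v ∈ s.take k := by
    have hjlt : j < (s.take k).length := by simp; omega
    have : (s.take k)[j]'hjlt = s[j]'(by omega) := List.getElem_take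
    rw [← h1, ← this]
    exact List.getElem_mem hjlt
  have hdrop : s.drop k = s[k] :: s.drop (k + 1) := List.drop_eq_getElem_cons hk
  calc 2 ≤ 1 + (s.drop k).count v := by
        rw [hdrop, h2, List.count_cons_self]; omega
    _ ≤ (s.take k).count v + (s.drop k).count v := by
        have := List.one_le_count_iff.mpr h1'
        omega
    _ = s.count v := by rw [← List.count_append, ← hsplit]

-- count v ≥ 2 yields two distinct positions carrying v
theorem indices_of_two_le_count :
    ∀ (s : List Int) (v : Int), 2 ≤ s.count v →
      ∃ (j k : Nat) (hjk : j < k) (hk : k < s.length),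
        s[j]'(Nat.lt_trans hjk hk) = v ∧ s[k] = v := by
  intro s
  induction s with
  | nil => intro v h; simp at h
  | cons x t ih =>
    intro v h
    by_cases hx : x = v
    · have htc : 1 ≤ t.count v := by
        rw [List.count_cons, if_pos (by simp [hx])] at h; omega
      have hvt : v ∈ t := List.one_le_count_iff.mp htc
      obtain ⟨i, hi, hti⟩ := List.mem_iff_getElem.mp hvt
      exact ⟨0, i + 1, by omega, by simpa using hi, by simpa using hx, by simpa using hti⟩
    · have htc : 2 ≤ t.count v := by
        rw [List.count_cons, if_neg (by simp [hx])] at h; omega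
      obtain ⟨j, k, hjk, hk, hj1, hk1⟩ := ih v htc
      exact ⟨j + 1, k + 1, by omega, by simpa using hk, by simpa using hj1, by simpa using hk1⟩

-- on a weakly increasing list, B's neighbour test at position k says exactly
-- "s[k] occurs once and neither s[k]-1 nor s[k]+1 occurs"
theorem cond_char (s : List Int)
    (mono : ∀ (p q : Nat) (hpq : p ≤ q) (hq : q < s.length),
      s[p]'(Nat.lt_of_le_of_lt hpq hq) ≤ s[q])
    (k : Nat) (hk : k < s.length) :
    pvLonelyCond s (k : Int) = true ↔
      (s.count s[k] = 1 ∧ (s[k] - 1) ∉ s ∧ (s[k] + 1) ∉ s) := by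
  have hget : PySem.List.pyGetD s (k : Int) 0 = s[k] := by
    rw [PySem.List.pyGetD_eq_getElem s 0 (by omega) (by exact_mod_cast hk)]
    congr 1
  constructor
  · intro hcond
    simp only [pvLonelyCond, Bool.and_eq_true, Bool.or_eq_true, decide_eq_true_eq] at hcond
    obtain ⟨hL, hR⟩ := hcond
    have hother : ∀ (j : Nat) (hj : j < s.length), j ≠ k →
        s[j] ≤ s[k] - 2 ∨ s[k] + 2 ≤ s[j] := by
      intro j hj hjk
      rcases Nat.lt_or_ge j k with hlt | hge
      · left
        rcases hL with h0 | hle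
        · exact absurd hlt (by omega)
        · have e1 : PySem.List.pyGetD s ((k : Int) - 1) 0 = s[k - 1]'(by omega) := by
            rw [PySem.List.pyGetD_eq_getElem s 0 (by omega) (by omega)]
            congr 1; omega
          rw [e1, hget] at hle
          have := mono j (k - 1) (by omega) (by omega)
          omega
      · have hgt : k < j := by omega
        right
        rcases hR with hlast | hge2
        · exact absurd hj (by omega)
        · have e1 : PySem.List.pyGetD s ((k : Int) + 1) 0 = s[k + 1]'(by omega) := by
            rw [PySem.List.pyGetD_eq_getElem s 0 (by omega) (by omega)]
            congr 1
          rw [e1, hget] at hge2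
          have := mono (k + 1) j (by omega) hj
          omega
    refine ⟨?_, ?_, ?_⟩
    · have h1 : 1 ≤ s.count s[k] := List.one_le_count_iff.mpr (List.getElem_mem hk)
      by_contra hne
      have h2 : 2 ≤ s.count s[k] := by omega
      obtain ⟨j, k', hjk', hk', hj1, hk1⟩ := indices_of_two_le_count s s[k] h2
      by_cases hjeq : j = k
      · have hne' : k' ≠ k := by omega
        rcases hother k' hk' hne' with h | h <;> (rw [hk1] at h; omega)
      · rcases hother j (by omega) hjeq with h | h <;> (rw [hj1] at h; omega)
    · intro hmem
      obtain ⟨j, hj, hj1⟩ := List.mem_iff_getElem.mp hmem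
      have hjk : j ≠ k := by
        intro he; subst he; omega
      rcases hother j hj hjk with h | h <;> (rw [hj1] at h; omega)
    · intro hmem
      obtain ⟨j, hj, hj1⟩ := List.mem_iff_getElem.mp hmem
      have hjk : j ≠ k := by
        intro he; subst he; omega
      rcases hother j hj hjk with h | h <;> (rw [hj1] at h; omega)
  · rintro ⟨hc, hm1, hp1⟩
    simp only [pvLonelyCond, Bool.and_eq_true, Bool.or_eq_true, decide_eq_true_eq]
    constructor
    · by_cases hk0 : k = 0
      · left; omega
      · right
        have e1 : PySem.List.pyGetD s ((k : Int) - 1) 0 = s[k - 1]'(by omega) := by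
          rw [PySem.List.pyGetD_eq_getElem s 0 (by omega) (by omega)]
          congr 1; omega
        rw [e1, hget]
        have hle : s[k - 1]'(by omega) ≤ s[k] := mono (k - 1) k (by omega) hk
        have hne : s[k - 1]'(by omega) ≠ s[k] := by
          intro he
          have := two_le_count_of_indices s s[k] (k - 1) k (by omega) hk he rfl
          omega
        have hne2 : s[k - 1]'(by omega) ≠ s[k] - 1 := by
          intro he
          exact hm1 (he ▸ List.getElem_mem (show k - 1 < s.length by omega))
        omega
    · by_cases hklast : k + 1 = s.length
      · left; omega
      · right
        have hk1lt : k + 1 < s.length := by omega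
        have e1 : PySem.List.pyGetD s ((k : Int) + 1) 0 = s[k + 1] := by
          rw [PySem.List.pyGetD_eq_getElem s 0 (by omega) (by omega)]
          congr 1
        rw [e1, hget]
        have hle : s[k] ≤ s[k + 1] := mono k (k + 1) (by omega) hk1lt
        have hne : s[k + 1] ≠ s[k] := by
          intro he
          have := two_le_count_of_indices s s[k] k (k + 1) (by omega) hk1lt rfl he
          omega
        have hne2 : s[k + 1] ≠ s[k] + 1 := by
          intro he
          exact hp1 (he ▸ List.getElem_mem hk1lt)
        omega

-- A's result is the counter's key list filtered by the (de-dict-ified) lonely test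
theorem findLonely_char (nums : List Int) :
    findLonely nums = (PySem.Set.ofList nums).filter (fun key =>
      !(decide ((List.count key nums : Int) > 1) || nums.contains (key - 1)
        || nums.contains (key + 1))) := by
  unfold findLonely
  have hcount : nums.foldl (fun d n =>
      if d.contains n then d.insert n (d.getD n 0 + 1) else d.insert n 1)
      (PySem.Dict.empty : PySem.Dict Int Int)
      = PySem.Dict.counter nums := by
    rw [PySem.List.foldl_congr_mem nums _ (fun d n => d.insert n (d.getD n 0 + 1))
      PySem.Dict.empty ?_]
    · exact PySem.Dict.foldl_insert_getD_add_one_eq_counter nums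
    · intro d n _
      by_cases hc : d.contains n = true
      · simp [hc]
      · have hc' : d.contains n = false := by simpa using hc
        rw [if_neg (by simp [hc'])]
        show d.insert n 1 = d.insert n (d.getD n 0 + 1)
        rw [PySem.Dict.getD_of_not_contains d 0 hc']
        norm_num
  rw [hcount]
  have hshape : ∀ (acc : List Int) (key : Int), key ∈ (PySem.Dict.counter nums).keys →
      (if (PySem.Dict.counter nums).getD key 0 > 1 then acc
       else if (PySem.Dict.counter nums).contains (key - 1) = true then acc
       else if (PySem.Dict.counter nums).contains (key + 1) = true then acc
       else acc ++ [key])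
      = (if (!(decide ((List.count key nums : Int) > 1) || nums.contains (key - 1)
              || nums.contains (key + 1))) = true then acc ++ [key] else acc) := by
    intro acc key _
    rw [PySem.Dict.getD_counter, PySem.Dict.contains_counter, PySem.Dict.contains_counter]
    by_cases h1 : ((List.count key nums : Int) > 1) <;>
      by_cases h2 : (key - 1) ∈ nums <;>
        by_cases h3 : (key + 1) ∈ nums <;>
          simp [h1, h2, h3]
  rw [PySem.List.foldl_congr_mem _ _ _ _ (fun acc key h => hshape acc key h),
    PySem.List.foldl_append_if_eq_filter, PySem.Dict.keys_counter]
  simp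

-- ===== VERDICT (by name: the statement is the Claim_ definition above) =====
theorem findLonely_spec : Claim_equal_findLonely := by
  intro nums _
  show findLonely nums = findLonely_alt nums
  have hmono : ∀ (p q : Nat) (hpq : p ≤ q)
      (hq : q < (PySem.List.sorted nums (fun x => x)).length),
      (PySem.List.sorted nums (fun x => x))[p]'(Nat.lt_of_le_of_lt hpq hq)
        ≤ (PySem.List.sorted nums (fun x => x))[q] :=
    fun p q hpq hq => PySem.List.sorted_id_getElem_mono nums hpq hq
  have hperm : (PySem.List.sorted nums (fun x => x)).Perm nums :=
    PySem.List.sorted_perm nums (fun x => x) false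
  -- membership in B's lonely set
  have hlonely : ∀ m : Int,
      (m ∈ (PySem.List.pyRange 0 ((PySem.List.sorted nums (fun x => x)).length : Int) 1).foldl
        (fun acc i => if pvLonelyCond (PySem.List.sorted nums (fun x => x)) i
          then PySem.Set.add acc (PySem.List.pyGetD (PySem.List.sorted nums (fun x => x)) i 0)
          else acc) ([] : PySem.Set Int)) ↔
      (m ∈ nums ∧ List.count m nums = 1 ∧ (m - 1) ∉ nums ∧ (m + 1) ∉ nums) := by
    intro m
    rw [mem_foldl_add_if]
    simp only [List.not_mem_nil, false_or]
    have hmemn : ∀ x : Int, x ∈ PySem.List.sorted nums (fun y => y) ↔ x ∈ nums :=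
      fun x => hperm.mem_iff
    have hcnt : ∀ x : Int, List.count x (PySem.List.sorted nums (fun y => y)) = List.count x nums :=
      fun x => hperm.count_eq x
    constructor
    · rintro ⟨i, hi, hci, hfi⟩
      rw [PySem.List.mem_pyRange_one] at hi
      obtain ⟨h0, hlen⟩ := hi
      have hklt : i.toNat < (PySem.List.sorted nums (fun x => x)).length := by omega
      have hcd : pvLonelyCond (PySem.List.sorted nums (fun x => x)) ((i.toNat : Nat) : Int) = true := by
        rw [show ((i.toNat : Nat) : Int) = i by omega]; exact hci
      have hval : (PySem.List.sorted nums (fun x => x))[i.toNat] = m := by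
        rw [← hfi, PySem.List.pyGetD_eq_getElem _ 0 h0 hlen]
      have hchar := (cond_char _ hmono i.toNat hklt).mp hcd
      rw [hval] at hchar
      refine ⟨(hmemn m).mp (hval ▸ List.getElem_mem hklt), ?_, ?_, ?_⟩
      · rw [← hcnt]; exact hchar.1
      · rw [← hmemn]; exact hchar.2.1
      · rw [← hmemn]; exact hchar.2.2
    · rintro ⟨hm, hc, h1, h2⟩
      obtain ⟨k, hklt, hkv⟩ := List.mem_iff_getElem.mp ((hmemn m).mpr hm)
      have hcd := (cond_char _ hmono k hklt).mpr (by
        rw [hkv, hcnt]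
        exact ⟨hc, fun h => h1 ((hmemn _).mp h), fun h => h2 ((hmemn _).mp h)⟩)
      refine ⟨(k : Int), ?_, hcd, ?_⟩
      · rw [PySem.List.mem_pyRange_one]; omega
      · rw [PySem.List.pyGetD_eq_getElem _ 0 (by omega) (by exact_mod_cast hklt)]
        simpa using hkv
  -- A side: counter filter = filter of nums (lonely values occur at most once)
  rw [findLonely_char nums, PySem.Set.ofList_eq_foldl, filter_foldl_add _ nums [] ?_]
  · simp only [List.filter_nil, List.nil_append]
    show _ = findLonely_alt nums
    simp only [findLonely_alt]
    apply List.filter_congr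
    intro n hn
    rw [Bool.eq_iff_iff]
    have hone : 1 ≤ List.count n nums := List.one_le_count_iff.mpr hn
    simp only [Bool.not_eq_true', Bool.or_eq_false_iff, decide_eq_false_iff_not, not_lt,
      PySem.Set.contains, List.contains_iff_mem, hlonely n]
    constructor
    · rintro ⟨⟨hcle, hm1⟩, hm2⟩
      exact ⟨hn, by exact_mod_cast Nat.le_antisymm (by exact_mod_cast hcle) hone,
        by simpa using hm1, by simpa using hm2⟩
    · rintro ⟨-, hc, hm1, hm2⟩
      exact ⟨⟨by omega, by simpa using hm1⟩, by simpa using hm2⟩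
  · intro n hp
    simp only [Bool.not_eq_true', Bool.or_eq_false_iff, decide_eq_false_iff_not, not_lt] at hp
    have := hp.1.1
    simp only [List.count_nil]
    omega
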